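-- pv_equiv track=rewrite | github.com/ccss17/preprocess-SVS-dataset | src/preprocess_svs/lyric_normalizer.py | split_indices_by_pitch_change
-- ===== SOURCE A (Python) =====
-- from typing import Dict, List, Tuple, Optional
--
-- def split_indices_by_pitch_change(
--     raw_indices: List[int], pitch_sequence: List[int]
-- ) -> List[Tuple[int, int]]:
--     """
--     Example:
--         raw_indices: [0, 1, 2, 3]
--         pitch_sequence: [60, 60, 61, 61]
--         return: [(0, 1), (2, 3)]
--     """
--     split_points = []
--     for i in range(raw_indices[0], raw_indices[-1]):
--         if pitch_sequence[i] != pitch_sequence[i + 1]: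
--             split_points.append(i)
--
--     split_indices = []
--     start = raw_indices[0]
--     for point in split_points:
--         split_indices.append((start, point))
--         start = point + 1
--     split_indices.append((start, raw_indices[-1]))
--
--     return split_indices
-- ===== SOURCE B (Python) =====
-- from itertools import groupby
-- from typing import List, Tuple
--
--
-- def split_indices_by_pitch_change(
--     raw_indices: List[int], pitch_sequence: List[int]
-- ) -> List[Tuple[int, int]]:
--     first = raw_indices[0]
--     last = raw_indices[-1]
--     if first >= last:
--         return [(first, last)]
--     segments = []
--     start = first
--     for _key, group in groupby(pitch_sequence[i] for i in range(first, last + 1)):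
--         length = sum(1 for _ in group)
--         segments.append((start, start + length - 1))
--         start += length
--     return segments
-- ===== Notes on version B (the rewrite author's own statement) =====
-- stated objective: idiomatic
-- what changed: Replaces A's two passes (collect split points over an index range, then rebuild segments from them) with a single itertools.groupby pass over the pitches from first to last, emitting one segment per run of equal pitches, with an early return for the degenerate first >= last case.
import Mathlib
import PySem

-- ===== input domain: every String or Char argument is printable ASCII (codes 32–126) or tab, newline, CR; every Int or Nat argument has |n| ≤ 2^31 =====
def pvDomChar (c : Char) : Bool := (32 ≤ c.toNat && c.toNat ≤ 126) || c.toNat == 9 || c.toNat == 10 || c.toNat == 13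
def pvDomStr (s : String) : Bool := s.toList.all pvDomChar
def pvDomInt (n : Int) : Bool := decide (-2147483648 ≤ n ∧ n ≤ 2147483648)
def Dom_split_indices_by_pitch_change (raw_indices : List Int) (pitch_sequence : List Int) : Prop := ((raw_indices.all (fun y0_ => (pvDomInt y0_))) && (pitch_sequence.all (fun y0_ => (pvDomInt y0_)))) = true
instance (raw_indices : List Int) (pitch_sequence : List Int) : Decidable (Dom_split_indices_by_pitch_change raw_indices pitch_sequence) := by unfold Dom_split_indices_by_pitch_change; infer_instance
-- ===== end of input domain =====

-- B replaces A's two passes (collect pitch-change split points over an index range, then rebuild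
-- segments from them) with a single run-length (groupby) pass over the pitches from first to last,
-- emitting one segment per run, with an early return for the degenerate first >= last case;
-- objective: idiomatic. Pre_ excludes exactly the inputs where A raises an IndexError.


-- ===== PORT A =====
def split_indices_by_pitch_change (raw_indices : List Int) (pitch_sequence : List Int) : List (Int × Int) :=
  let split_points : List Int :=
    (PySem.List.pyRange (PySem.List.pyGetD raw_indices 0 0) (PySem.List.pyGetD raw_indices (-1) 0) 1).foldl
      (fun acc i =>
        if PySem.List.pyGetD pitch_sequence i 0 ≠ PySem.List.pyGetD pitch_sequence (i + 1) 0
        then acc ++ [i] else acc) []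
  let p : List (Int × Int) × Int :=
    split_points.foldl (fun st point => (st.1 ++ [(st.2, point)], point + 1))
      ([], PySem.List.pyGetD raw_indices 0 0)
  p.1 ++ [(p.2, PySem.List.pyGetD raw_indices (-1) 0)]

-- ===== PORT B =====
-- run lengths of the maximal equal runs: transliteration of the groupby loop's group lengths
def pvGroupLens (v : Int) (n : Nat) : List Int → List Nat
  | [] => [n]
  | b :: t => if v = b then pvGroupLens b (n + 1) t else n :: pvGroupLens b 1 t

def pvRunLengths : List Int → List Nat
  | [] => []
  | a :: t => pvGroupLens a 1 t

def split_indices_by_pitch_change_alt (raw_indices : List Int) (pitch_sequence : List Int) : List (Int × Int) :=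
  let first := PySem.List.pyGetD raw_indices 0 0
  let last := PySem.List.pyGetD raw_indices (-1) 0
  if last ≤ first then [(first, last)]
  else
    -- the generator (pitch_sequence[i] for i in range(first, last + 1))
    let vals := (PySem.List.pyRange first (last + 1) 1).map
      (fun i => PySem.List.pyGetD pitch_sequence i 0)
    ((pvRunLengths vals).foldl
      (fun st L => (st.1 ++ [(st.2, st.2 + (L : Int) - 1)], st.2 + (L : Int))) ([], first)).1

-- ===== PRECONDITION & SPEC =====
-- Pre_ excludes exactly the inputs where A raises IndexError: an empty raw_indices, and a first
-- index strictly below a last index such that the range walks outside pitch_sequence's index range.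
def Pre_split_indices_by_pitch_change (raw_indices : List Int) (pitch_sequence : List Int) : Prop :=
  raw_indices ≠ [] ∧
  (PySem.List.pyGetD raw_indices 0 0 < PySem.List.pyGetD raw_indices (-1) 0 →
    -(pitch_sequence.length : Int) ≤ PySem.List.pyGetD raw_indices 0 0 ∧
    PySem.List.pyGetD raw_indices (-1) 0 < (pitch_sequence.length : Int))
instance (raw_indices : List Int) (pitch_sequence : List Int) : Decidable (Pre_split_indices_by_pitch_change raw_indices pitch_sequence) := by unfold Pre_split_indices_by_pitch_change; infer_instance

def pvWitness_split_indices_by_pitch_change : List Int × List Int := ([0, 1, 2, 3], [60, 60, 61, 61])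

def Spec_split_indices_by_pitch_change (raw_indices : List Int) (pitch_sequence : List Int) (out : List (Int × Int)) : Prop := out = split_indices_by_pitch_change_alt raw_indices pitch_sequence
instance (raw_indices : List Int) (pitch_sequence : List Int) (out : List (Int × Int)) : Decidable (Spec_split_indices_by_pitch_change raw_indices pitch_sequence out) := by unfold Spec_split_indices_by_pitch_change; infer_instance

-- ===== CLAIM (what is proved, stated in full; the proofs are below) =====
def Claim_equal_split_indices_by_pitch_change : Prop := ∀ (raw_indices : List Int) (pitch_sequence : List Int), Dom_split_indices_by_pitch_change raw_indices pitch_sequence → Pre_split_indices_by_pitch_change raw_indices pitch_sequence → Spec_split_indices_by_pitch_change raw_indices pitch_sequence (split_indices_by_pitch_change raw_indices pitch_sequence)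

-- ===== LEMMAS AND PROOFS =====

-- abstract form of A's second loop
def pvBuildA (st l : Int) : List Int → List (Int × Int)
  | [] => [(st, l)]
  | p :: ps => (st, p) :: pvBuildA (p + 1) l ps

-- abstract form of B's loop
def pvBuildB (st : Int) : List Nat → List (Int × Int)
  | [] => []
  | L :: ls => (st, st + (L : Int) - 1) :: pvBuildB (st + (L : Int)) ls

def pvSetStart (st : Int) : List (Int × Int) → List (Int × Int)
  | [] => []
  | (_, e) :: r => (st, e) :: r

lemma pvFoldA (l : Int) : ∀ (sp : List Int) (si : List (Int × Int)) (st : Int),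
    (let p := sp.foldl (fun st point => (st.1 ++ [(st.2, point)], point + 1)) (si, st)
     p.1 ++ [(p.2, l)]) = si ++ pvBuildA st l sp := by
  intro sp
  induction sp with
  | nil => intro si st; simp [pvBuildA]
  | cons p ps ih => intro si st; simpa [pvBuildA, List.foldl_cons] using ih (si ++ [(st, p)]) (p + 1)

lemma pvFoldB : ∀ (ls : List Nat) (si : List (Int × Int)) (st : Int),
    ((ls.foldl (fun st L => (st.1 ++ [(st.2, st.2 + (L : Int) - 1)], st.2 + (L : Int))) (si, st)).1)
      = si ++ pvBuildB st ls := by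
  intro ls
  induction ls with
  | nil => intro si st; simp [pvBuildB]
  | cons L ls ih => intro si st; simpa [pvBuildB, List.foldl_cons] using ih (si ++ [(st, st + (L : Int) - 1)]) (st + L)

lemma pvBuildA_setStart (l : Int) : ∀ (sp : List Int) (st st' : Int),
    pvSetStart st (pvBuildA st' l sp) = pvBuildA st l sp := by
  intro sp st st'
  cases sp <;> simp [pvBuildA, pvSetStart]

lemma pvGoShift : ∀ (t : List Int) (v : Int) (n : Nat) (st : Int),
    pvBuildB st (pvGroupLens v (n + 1) t) = pvSetStart st (pvBuildB (st + 1) (pvGroupLens v n t)) := by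
  intro t
  induction t with
  | nil =>
    intro v n st
    simp [pvGroupLens, pvBuildB, pvSetStart]
    ring
  | cons b t ih =>
    intro v n st
    by_cases h : v = b
    · simp only [pvGroupLens, if_pos h]
      exact ih b (n + 1) st
    · simp only [pvGroupLens, if_neg h, pvBuildB, pvSetStart]
      have e1 : st + ((n : Int) + 1) - 1 = st + 1 + (n : Int) - 1 := by ring
      have e2 : st + ((n : Int) + 1) = st + 1 + (n : Int) := by ring
      push_cast
      rw [e1, e2]

-- the heart: on [f, l], A's split points build the same segments as B's run lengths
lemma pvMain (ps : List Int) (l : Int) :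
    ∀ (n : Nat) (f : Int), f + (n : Int) = l →
    pvBuildA f l ((PySem.List.pyRange f l 1).filter
        (fun i => decide (PySem.List.pyGetD ps i 0 ≠ PySem.List.pyGetD ps (i + 1) 0)))
      = pvBuildB f (pvRunLengths ((PySem.List.pyRange f (l + 1) 1).map
          (fun i => PySem.List.pyGetD ps i 0))) := by
  intro n
  induction n with
  | zero =>
    intro f hfl
    have hfl' : f = l := by omega
    subst hfl'
    rw [PySem.List.pyRange_one_eq_nil (le_refl f), PySem.List.pyRange_one_singleton]
    simp [pvBuildA, pvRunLengths, pvGroupLens, pvBuildB]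
  | succ n ih =>
    intro f hfl
    have hflt : f < l := by omega
    have hIH := ih (f + 1) (by omega)
    rw [PySem.List.pyRange_one_cons (show f < l + 1 by omega), List.map_cons]
    rw [PySem.List.pyRange_one_cons (show f + 1 < l + 1 by omega), List.map_cons] at hIH ⊢
    rw [PySem.List.pyRange_one_cons hflt, List.filter_cons]
    by_cases hab : PySem.List.pyGetD ps f 0 = PySem.List.pyGetD ps (f + 1) 0
    · -- no pitch change at f: f is filtered out, the first run extends by one
      rw [if_neg (by simp [hab])]
      rw [← pvBuildA_setStart l _ f (f + 1), hIH]
      simp only [pvRunLengths, pvGroupLens, if_pos hab]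
      exact (pvGoShift _ _ 1 f).symm
    · -- pitch change at f: f is a split point, (f, f) is a one-element run
      rw [if_pos (by simp [hab])]
      simp only [pvRunLengths, pvGroupLens, if_neg hab, pvBuildA, pvBuildB]
      have hIH' := hIH
      simp only [pvRunLengths] at hIH'
      push_cast
      norm_num
      simpa using hIH'

-- link A's port to the abstract form
lemma pvA_eq (raw_indices pitch_sequence : List Int) :
    split_indices_by_pitch_change raw_indices pitch_sequence
      = pvBuildA (PySem.List.pyGetD raw_indices 0 0) (PySem.List.pyGetD raw_indices (-1) 0)
          ((PySem.List.pyRange (PySem.List.pyGetD raw_indices 0 0) (PySem.List.pyGetD raw_indices (-1) 0) 1).filter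
            (fun i => decide (PySem.List.pyGetD pitch_sequence i 0 ≠ PySem.List.pyGetD pitch_sequence (i + 1) 0))) := by
  unfold split_indices_by_pitch_change
  have hfold : ∀ (xs : List Int) (acc : List Int),
      xs.foldl (fun acc i =>
        if PySem.List.pyGetD pitch_sequence i 0 ≠ PySem.List.pyGetD pitch_sequence (i + 1) 0
        then acc ++ [i] else acc) acc
      = acc ++ (xs.filter (fun i => decide (PySem.List.pyGetD pitch_sequence i 0 ≠ PySem.List.pyGetD pitch_sequence (i + 1) 0))).map id := by
    intro xs acc
    rw [← PySem.List.foldl_append_if (fun i => decide (PySem.List.pyGetD pitch_sequence i 0 ≠ PySem.List.pyGetD pitch_sequence (i + 1) 0)) id xs acc]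
    simp
  simp only [hfold, List.map_id, List.nil_append]
  exact pvFoldA _ _ [] _

-- link B's port to the abstract form
lemma pvB_eq (raw_indices pitch_sequence : List Int) :
    split_indices_by_pitch_change_alt raw_indices pitch_sequence
      = (if PySem.List.pyGetD raw_indices (-1) 0 ≤ PySem.List.pyGetD raw_indices 0 0
         then [(PySem.List.pyGetD raw_indices 0 0, PySem.List.pyGetD raw_indices (-1) 0)]
         else pvBuildB (PySem.List.pyGetD raw_indices 0 0)
           (pvRunLengths ((PySem.List.pyRange (PySem.List.pyGetD raw_indices 0 0)
               (PySem.List.pyGetD raw_indices (-1) 0 + 1) 1).map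
             (fun i => PySem.List.pyGetD pitch_sequence i 0)))) := by
  unfold split_indices_by_pitch_change_alt
  by_cases h : PySem.List.pyGetD raw_indices (-1) 0 ≤ PySem.List.pyGetD raw_indices 0 0
  · simp [h]
  · simp only [h, if_false]
    rw [pvFoldB _ [] _]
    simp

-- ===== VERDICT (by name: the statement is the Claim_ definition above) =====
theorem split_indices_by_pitch_change_spec : Claim_equal_split_indices_by_pitch_change := by
  intro raw_indices pitch_sequence _hdom _hpre
  unfold Spec_split_indices_by_pitch_change
  set f := PySem.List.pyGetD raw_indices 0 0 with hf
  set l := PySem.List.pyGetD raw_indices (-1) 0 with hl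
  rw [pvA_eq, pvB_eq]
  simp only [← hf, ← hl]
  by_cases hcmp : l ≤ f
  · -- first >= last: A's range is empty, B returns early
    rw [if_pos hcmp, PySem.List.pyRange_one_eq_nil hcmp]
    simp [pvBuildA]
  · rw [if_neg hcmp]
    exact pvMain pitch_sequence l (l - f).toNat f (by omega)
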